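-- pv_equiv track=rewrite | github.com/DenBugNBA/YandexAlgorithmsTrainings | 8. Trees (2.0 B)/B/B_Pedigree_ancestors_and_descendants.py | find_descendant
-- ===== SOURCE A (Python) =====
-- from collections import deque
--
-- def find_descendant(ancestor_name, target_descendant, tree):
--     candidates = deque([ancestor_name])
--
--     while candidates:
--         current_ancestor = candidates.popleft()
--
--         if current_ancestor in tree:
--             for descendant in tree[current_ancestor]:
--                 if descendant == target_descendant:
--                     return True
--
--                 candidates.append(descendant)
--
--     return False
-- ===== SOURCE B (Python) =====
-- def find_descendant(ancestor_name, target_descendant, tree):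
--     def reachable(name):
--         if name not in tree:
--             return False
--         return any(child == target_descendant or reachable(child)
--                    for child in tree[name])
--     return reachable(ancestor_name)
-- ===== Notes on version B (the rewrite author's own statement) =====
-- stated objective: simpler
-- what changed: Replaces the explicit deque-based breadth-first search with a short recursive depth-first helper over the child lists (only children are ever compared to the target, as in A); Pre_ excludes trees with a cycle reachable from ancestor_name (the explored part must be an actual pedigree): there A loops forever when the target is not found, and B's recursion can overflow even where A returns True.
-- outside the precondition, e.g. on find_descendant('a', 't', {'a': ['b', 't'], 'b': ['b']}): A returns True, B raises RecursionError
import Mathlib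
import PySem

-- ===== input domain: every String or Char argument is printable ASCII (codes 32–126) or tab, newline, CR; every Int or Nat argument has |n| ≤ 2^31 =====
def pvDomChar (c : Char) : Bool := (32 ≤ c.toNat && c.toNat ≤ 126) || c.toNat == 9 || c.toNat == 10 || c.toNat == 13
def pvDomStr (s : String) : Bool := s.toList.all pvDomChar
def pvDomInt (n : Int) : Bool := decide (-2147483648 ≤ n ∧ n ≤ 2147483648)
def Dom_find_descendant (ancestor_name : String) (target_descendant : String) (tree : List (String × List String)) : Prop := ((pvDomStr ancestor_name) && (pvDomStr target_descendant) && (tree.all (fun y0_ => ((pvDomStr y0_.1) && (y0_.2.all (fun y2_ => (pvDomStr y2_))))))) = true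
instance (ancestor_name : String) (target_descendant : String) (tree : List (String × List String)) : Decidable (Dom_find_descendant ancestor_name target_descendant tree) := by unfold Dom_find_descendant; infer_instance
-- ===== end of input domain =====

-- B replaces A's explicit deque BFS by a recursive DFS helper (same return value on the
-- acyclic trees admitted by Pre_; no speed claim).

-- ===== PORT A =====
-- inner `for descendant in tree[current_ancestor]` loop of A: early-return (none) when the
-- target is met, otherwise append each child to the queue
def findScanA (target : String) : List String → List String → Option (List String)
  | [], q => some q
  | c :: cs, q => if c = target then none else findScanA target cs (q ++ [c])

-- fuel for A's while-loop: size of the unfolding of x (under Pre_ this fuel is proved sufficient)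
def sizeW (tree : List (String × List String)) : Nat → String → Nat
  | 0, _ => 1
  | f+1, x =>
    match (PySem.Dict.mk tree).get? x with
    | none => 1
    | some cs => 1 + (cs.map (sizeW tree f)).sum

-- the `while candidates:` loop of A over the queue
def bfsA (tree : List (String × List String)) (target : String) : Nat → List String → Bool
  | 0, _ => false
  | _+1, [] => false
  | f+1, x :: rest =>
    match (PySem.Dict.mk tree).get? x with
    | none => bfsA tree target f rest
    | some cs =>
      match findScanA target cs rest with
      | none => true
      | some q' => bfsA tree target f q'

def find_descendant (ancestor_name : String) (target_descendant : String) (tree : List (String × List String)) : Bool :=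
  bfsA tree target_descendant (sizeW tree (tree.length + 1) ancestor_name) [ancestor_name]

-- ===== PORT B =====
-- the recursive helper `reachable`; fuel tree.length + 1 is proved sufficient on acyclic trees
def reachB (tree : List (String × List String)) (target : String) : Nat → String → Bool
  | 0, _ => false
  | f+1, name =>
    match (PySem.Dict.mk tree).get? name with
    | none => false
    | some cs => cs.any (fun c => c == target || reachB tree target f c)

def find_descendant_alt (ancestor_name : String) (target_descendant : String) (tree : List (String × List String)) : Bool :=
  reachB tree target_descendant (tree.length + 1) ancestor_name

-- ===== PRECONDITION & SPEC =====
-- graph-shape helpers for Pre_ (they do not search for target_descendant): one parent→child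
-- step in the tree, and bounded reachability
def childStep (tree : List (String × List String)) (x y : String) : Bool :=
  match (PySem.Dict.mk tree).get? x with
  | none => false
  | some cs => cs.contains y

-- y reachable from x in 1 .. f+1 child steps; paths of length tree.length suffice to witness
-- any cycle or any reachability fact, since a shortest path never repeats a key
def walksTo (tree : List (String × List String)) : Nat → String → String → Bool
  | 0, x, y => childStep tree x y
  | f+1, x, y => childStep tree x y ||
      (match (PySem.Dict.mk tree).get? x with
       | none => false
       | some cs => cs.any (fun c => walksTo tree f c y))

-- Pre_ excludes trees in which a cycle is reachable from ancestor_name — a condition on the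
-- shape of the input graph only (the explored part of the input must be an actual pedigree,
-- i.e. acyclic): on such inputs A loops forever when the target is not found, and B's
-- recursion can overflow even where A returns True.
def Pre_find_descendant (ancestor_name : String) (target_descendant : String) (tree : List (String × List String)) : Prop :=
  ∀ p ∈ tree, (p.1 = ancestor_name ∨ walksTo tree tree.length ancestor_name p.1 = true) →
    walksTo tree tree.length p.1 p.1 = false

instance (ancestor_name : String) (target_descendant : String) (tree : List (String × List String)) : Decidable (Pre_find_descendant ancestor_name target_descendant tree) := by
  unfold Pre_find_descendant; infer_instance

def pvWitness_find_descendant : String × String × (List (String × List String)) :=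
  ("alice", "bob", [("alice", ["carol", "dan"]), ("carol", ["bob"])])

def Spec_find_descendant (ancestor_name : String) (target_descendant : String) (tree : List (String × List String)) (out : Bool) : Prop := out = find_descendant_alt ancestor_name target_descendant tree
instance (ancestor_name : String) (target_descendant : String) (tree : List (String × List String)) (out : Bool) : Decidable (Spec_find_descendant ancestor_name target_descendant tree out) := by unfold Spec_find_descendant; infer_instance

-- ===== CLAIM (what is proved, stated in full; the proofs are below) =====
def Claim_equal_find_descendant : Prop := ∀ (ancestor_name : String) (target_descendant : String) (tree : List (String × List String)), Dom_find_descendant ancestor_name target_descendant tree → Pre_find_descendant ancestor_name target_descendant tree → Spec_find_descendant ancestor_name target_descendant tree (find_descendant ancestor_name target_descendant tree)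

-- ===== LEMMAS AND PROOFS =====

-- the step relation, and "x can reach the target" as a transitive closure
def relT (tree : List (String × List String)) (x y : String) : Prop := childStep tree x y = true

def wF (tree : List (String × List String)) (x : String) : Nat := sizeW tree (tree.length + 1) x

def phi (tree : List (String × List String)) (q : List String) : Nat := (q.map (wF tree)).sum

lemma bfsA_succ_cons (tree : List (String × List String)) (t : String) (f : Nat)
    (x : String) (rest : List String) :
    bfsA tree t (f+1) (x :: rest) =
      match (PySem.Dict.mk tree).get? x with
      | none => bfsA tree t f rest
      | some cs =>
        match findScanA t cs rest with
        | none => true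
        | some q' => bfsA tree t f q' := rfl

lemma reachB_succ (tree : List (String × List String)) (t : String) (f : Nat) (x : String) :
    reachB tree t (f+1) x =
      match (PySem.Dict.mk tree).get? x with
      | none => false
      | some cs => cs.any (fun c => c == t || reachB tree t f c) := rfl

lemma stepB_iff {tree : List (String × List String)} {x y : String} :
    childStep tree x y = true ↔ ∃ cs, (PySem.Dict.mk tree).get? x = some cs ∧ y ∈ cs := by
  unfold childStep
  cases h : (PySem.Dict.mk tree).get? x with
  | none => simp
  | some cs => simp

lemma key_of_relT {tree : List (String × List String)} {x y : String}
    (h : relT tree x y) : ((PySem.Dict.mk tree).get? x).isSome := by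
  rcases stepB_iff.mp h with ⟨cs, hcs, _⟩
  simp [hcs]

lemma scan_none_iff (t : String) : ∀ (cs q : List String),
    findScanA t cs q = none ↔ t ∈ cs := by
  intro cs
  induction cs with
  | nil => intro q; simp [findScanA]
  | cons c cs ih =>
    intro q
    by_cases h : c = t
    · subst h; simp [findScanA]
    · simp [findScanA, h, ih, Ne.symm h]

lemma scan_some (t : String) : ∀ (cs q : List String), t ∉ cs →
    findScanA t cs q = some (q ++ cs) := by
  intro cs
  induction cs with
  | nil => intro q _; simp [findScanA]
  | cons c cs ih =>
    intro q h
    have hc : ¬ c = t := fun e => h (e ▸ List.mem_cons_self ..)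
    have h2 : t ∉ cs := fun e => h (List.mem_cons_of_mem _ e)
    simp [findScanA, hc, ih _ h2]

lemma sizeW_pos (tree : List (String × List String)) (f : Nat) (x : String) :
    1 ≤ sizeW tree f x := by
  cases f with
  | zero => simp [sizeW]
  | succ f =>
    unfold sizeW
    cases (PySem.Dict.mk tree).get? x <;> simp

-- every element of m has a successor in the chain m ++ [z], hence is a key
lemma keys_of_chain (tree : List (String × List String)) :
    ∀ (m : List String) (z : String), List.IsChain (relT tree) (m ++ [z]) →
      ∀ v ∈ m, ((PySem.Dict.mk tree).get? v).isSome := by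
  intro m
  induction m with
  | nil => intro z _ v hv; simp at hv
  | cons a m ih =>
    intro z hch v hv
    rcases List.mem_cons.mp hv with rfl | hv
    · cases m with
      | nil =>
        exact key_of_relT (List.isChain_pair.mp (by simpa using hch))
      | cons b m' =>
        exact key_of_relT (List.isChain_cons_cons.mp (by simpa using hch)).1
    · have : List.IsChain (relT tree) (m ++ [z]) := by
        simp only [List.cons_append] at hch
        exact (List.isChain_cons.mp hch).2
      exact ih z this v hv

lemma len_bound (tree : List (String × List String)) (P : List String)
    (hnd : P.Nodup) (hk : ∀ v ∈ P, ((PySem.Dict.mk tree).get? v).isSome) :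
    P.length ≤ tree.length := by
  classical
  have hsub : P.toFinset ⊆ (tree.map Prod.fst).toFinset := by
    intro v hv
    rw [List.mem_toFinset] at hv ⊢
    have := hk v hv
    rcases Option.isSome_iff_exists.mp this with ⟨cs, hcs⟩
    have hmem : (v, cs) ∈ (PySem.Dict.mk tree).items :=
      PySem.Dict.mem_items_of_get?_eq_some _ hcs
    have hmem2 : (v, cs) ∈ tree := hmem
    exact List.mem_map.mpr ⟨(v, cs), hmem2, rfl⟩
  calc P.length = P.toFinset.card := (List.toFinset_card_of_nodup hnd).symm
    _ ≤ (tree.map Prod.fst).toFinset.card := Finset.card_le_card hsub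
    _ ≤ (tree.map Prod.fst).length := List.toFinset_card_le _
    _ = tree.length := List.length_map ..

-- a chain x :: l ++ [y] of length l.length + 1 is detected by walksTo with fuel ≥ l.length
lemma chain_reachN (tree : List (String × List String)) :
    ∀ (l : List String) (x y : String) (f : Nat),
      List.IsChain (relT tree) (x :: l ++ [y]) → l.length ≤ f →
      walksTo tree f x y = true := by
  intro l
  induction l with
  | nil =>
    intro x y f hch _
    have hxy : relT tree x y := List.isChain_pair.mp hch
    cases f with
    | zero => exact hxy
    | succ f =>
      simp only [walksTo, Bool.or_eq_true]
      exact Or.inl hxy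
  | cons c l ih =>
    intro x y f hch hf
    have hxc : relT tree x c := (List.isChain_cons_cons.mp hch).1
    have hrest : List.IsChain (relT tree) (c :: l ++ [y]) := (List.isChain_cons_cons.mp hch).2
    cases f with
    | zero => simp at hf
    | succ f =>
      rcases stepB_iff.mp hxc with ⟨cs, hcs, hc⟩
      have hrec : walksTo tree f c y = true := ih c y f hrest (by simpa using hf)
      simp only [walksTo, hcs, Bool.or_eq_true]
      exact Or.inr (List.any_eq_true.mpr ⟨c, hc, hrec⟩)

-- cutting a duplicated element out of a chain
lemma chain_cut {α : Type} {r : α → α → Prop} {p q s : List α} {v : α}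
    (h : List.IsChain r (p ++ v :: q ++ v :: s)) : List.IsChain r (p ++ v :: s) := by
  have h1 := List.isChain_append.mp (show List.IsChain r (p ++ (v :: q ++ v :: s)) by simpa using h)
  have h2 : List.IsChain r (v :: s) :=
    (List.isChain_append.mp (show List.IsChain r ((v :: q) ++ (v :: s)) by simpa using h1.2.1)).2.1
  rw [List.isChain_append]
  refine ⟨h1.1, h2, ?_⟩
  intro x hx y hy
  apply h1.2.2 x hx y
  simpa using hy

-- every non-nodup list splits around a duplicate
lemma exists_dup_decomp {α : Type} : ∀ (l : List α), ¬ l.Nodup →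
    ∃ (p : List α) (v : α) (q s : List α), l = p ++ v :: q ++ v :: s := by
  intro l
  induction l with
  | nil => intro h; exact absurd List.nodup_nil h
  | cons a l ih =>
    intro h
    rw [List.nodup_cons] at h
    push_neg at h
    by_cases ha : a ∈ l
    · rcases List.append_of_mem ha with ⟨q, s, rfl⟩
      exact ⟨[], a, q, s, by simp⟩
    · have hnl : ¬ l.Nodup := h ha
      rcases ih hnl with ⟨p, v, q, s, rfl⟩
      exact ⟨a :: p, v, q, s, by simp⟩

-- shorten any chain x :: l ++ [t] to one with x :: l' nodup
lemma dedup_chain {tree : List (String × List String)} {t : String} :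
    ∀ (n : Nat) (l : List String) (x : String), l.length ≤ n →
      List.IsChain (relT tree) (x :: l ++ [t]) →
      ∃ l', (x :: l').Nodup ∧ List.IsChain (relT tree) (x :: l' ++ [t]) := by
  intro n
  induction n using Nat.strong_induction_on with
  | _ n IH =>
    intro l x hl hch
    by_cases hnd : (x :: l).Nodup
    · exact ⟨l, hnd, hch⟩
    · rcases exists_dup_decomp _ hnd with ⟨p, v, q, s, hdec⟩
      -- rewrite x :: l ++ [t] as p ++ v :: q ++ v :: (s ++ [t])
      have hfull : x :: l ++ [t] = p ++ v :: q ++ v :: (s ++ [t]) := by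
        calc x :: l ++ [t] = (x :: l) ++ [t] := by simp
          _ = (p ++ v :: q ++ v :: s) ++ [t] := by rw [hdec]
          _ = p ++ v :: q ++ v :: (s ++ [t]) := by simp
      have hcut : List.IsChain (relT tree) (p ++ v :: (s ++ [t])) := by
        apply chain_cut (q := q)
        rw [← hfull]; exact hch
      have hlen : (p ++ v :: s).length < (x :: l).length := by
        have := congrArg List.length hdec
        simp at this ⊢
        omega
      cases p with
      | nil =>
        have hv : v = x := by
          have := congrArg (fun l => l.head?) hdec
          simpa using this.symm
        subst hv
        have hc2 : List.IsChain (relT tree) (v :: s ++ [t]) := by simpa using hcut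
        exact IH s.length (by simp at hlen hl; omega) s v (le_refl _) hc2
      | cons b p' =>
        have hv : b = x := by
          have := congrArg (fun l => l.head?) hdec
          simpa using this.symm
        subst hv
        have hc2 : List.IsChain (relT tree) (b :: (p' ++ v :: s) ++ [t]) := by
          simpa using hcut
        exact IH (p' ++ v :: s).length (by simp at hlen hl ⊢; omega) (p' ++ v :: s) b (le_refl _) hc2

-- a transitive path from a is detected by walksTo with fuel tree.length
lemma reachN_of_tg {tree : List (String × List String)} {a x : String}
    (h : Relation.TransGen (relT tree) a x) :
    walksTo tree tree.length a x = true := by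
  rcases (Relation.TransGen.head'_iff).mp h with ⟨c, hac, hcx⟩
  rcases List.exists_isChain_cons_of_relationReflTransGen hcx with ⟨l, hchain, hlast⟩
  have hne : (c :: l) ≠ [] := by simp
  have hsplit : c :: l = (c :: l).dropLast ++ [x] := by
    conv_lhs => rw [← List.dropLast_append_getLast hne]
    rw [show (c :: l).getLast hne = x from hlast]
  have hch : List.IsChain (relT tree) (a :: (c :: l).dropLast ++ [x]) := by
    have h2 : List.IsChain (relT tree) (a :: (c :: l)) :=
      List.isChain_cons_cons.mpr ⟨hac, hchain⟩
    rw [hsplit] at h2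
    simpa using h2
  rcases dedup_chain (tree := tree) ((c :: l).dropLast.length) (c :: l).dropLast a
      (le_refl _) hch with ⟨l', hnd, hch'⟩
  have hkeys : ∀ v ∈ a :: l', ((PySem.Dict.mk tree).get? v).isSome :=
    keys_of_chain tree (a :: l') x (by simpa using hch')
  have hlen : (a :: l').length ≤ tree.length := len_bound tree _ hnd hkeys
  apply chain_reachN tree l' a x tree.length hch'
  simp at hlen
  omega

-- under Pre_, a nodup chain P ++ [x] cannot revisit: x ∉ P
lemma not_mem_of_pre {a t : String} {tree : List (String × List String)}
    (hpre : Pre_find_descendant a t tree) :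
    ∀ (P : List String) (x : String), List.IsChain (relT tree) (P ++ [x]) → P.Nodup →
      Relation.ReflTransGen (relT tree) a x → x ∉ P := by
  intro P x hch hnd hroot hx
  rcases List.append_of_mem hx with ⟨P₁, P₂, rfl⟩
  -- suffix chain x :: P₂ ++ [x]
  have hsfx : List.IsChain (relT tree) (x :: P₂ ++ [x]) := by
    have h0 : List.IsChain (relT tree) (P₁ ++ (x :: P₂ ++ [x])) := by
      simpa using hch
    exact h0.right_of_append
  -- x is a key
  have hkey : ((PySem.Dict.mk tree).get? x).isSome := by
    have hk := keys_of_chain tree (x :: P₂) x (by simpa using hsfx)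
    exact hk x (by simp)
  rcases Option.isSome_iff_exists.mp hkey with ⟨cs, hcs⟩
  have hmem : (x, cs) ∈ tree := PySem.Dict.mem_items_of_get?_eq_some _ hcs
  -- bound: P₂ length ≤ tree.length
  have hndP₂ : P₂.Nodup :=
    ((List.sublist_cons_self x P₂).trans (List.sublist_append_right P₁ (x :: P₂))).nodup hnd
  have hkeys : ∀ v ∈ P₂, ((PySem.Dict.mk tree).get? v).isSome := by
    intro v hv
    exact keys_of_chain tree (P₁ ++ x :: P₂) x hch v (by simp [hv])
  have hlen : P₂.length ≤ tree.length := len_bound tree P₂ hndP₂ hkeys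
  have hdet : walksTo tree tree.length x x = true :=
    chain_reachN tree P₂ x x tree.length hsfx hlen
  have hdisj : x = a ∨ walksTo tree tree.length a x = true := by
    rcases Relation.reflTransGen_iff_eq_or_transGen.mp hroot with he | htg
    · exact Or.inl he
    · exact Or.inr (reachN_of_tg htg)
  have := hpre (x, cs) hmem hdisj
  simp_all

-- (stability) under Pre_, sizeW is fuel-independent above tree.length + 1 - |path|
lemma sizeW_stable {a t : String} {tree : List (String × List String)}
    (hpre : Pre_find_descendant a t tree) :
    ∀ (n : Nat), ∀ (P : List String) (x : String),
      List.IsChain (relT tree) (P ++ [x]) → P.Nodup →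
      Relation.ReflTransGen (relT tree) a x →
      n = tree.length + 1 - P.length →
      ∀ m, n ≤ m → sizeW tree m x = sizeW tree n x := by
  intro n
  induction n using Nat.strong_induction_on with
  | _ n IH =>
    intro P x hch hnd hroot hn m hm
    have hkeys : ∀ v ∈ P, ((PySem.Dict.mk tree).get? v).isSome :=
      keys_of_chain tree P x hch
    have hPlen : P.length ≤ tree.length := len_bound tree P hnd hkeys
    have hn1 : 1 ≤ n := by omega
    obtain ⟨m', rfl⟩ : ∃ m', m = m' + 1 := ⟨m - 1, by omega⟩
    obtain ⟨k, rfl⟩ : ∃ k, n = k + 1 := ⟨n - 1, by omega⟩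
    cases hx : (PySem.Dict.mk tree).get? x with
    | none => unfold sizeW; rw [hx]
    | some cs =>
      -- x is a key, extend the path
      have hxP : x ∉ P := not_mem_of_pre hpre P x hch hnd hroot
      have hnd' : (P ++ [x]).Nodup := by
        simp [List.nodup_append, hnd]
        exact fun b hb he => hxP (he ▸ hb)
      have hkeys' : ∀ v ∈ P ++ [x], ((PySem.Dict.mk tree).get? v).isSome := by
        intro v hv
        rcases List.mem_append.mp hv with h | h
        · exact hkeys v h
        · simp at h; subst h; simp [hx]
      have hPlen' : (P ++ [x]).length ≤ tree.length := len_bound tree _ hnd' hkeys'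
      have hk1 : 1 ≤ k := by simp at hPlen'; omega
      have hkeq : k = tree.length + 1 - (P ++ [x]).length := by simp; omega
      have hchild : ∀ c ∈ cs, List.IsChain (relT tree) ((P ++ [x]) ++ [c]) := by
        intro c hc
        apply List.IsChain.append hch (List.isChain_singleton c)
        intro p hp y hy
        rw [List.getLast?_concat] at hp
        simp at hp hy
        subst hp; subst hy
        exact stepB_iff.mpr ⟨cs, hx, hc⟩
      have heach : ∀ c ∈ cs, sizeW tree m' c = sizeW tree k c := by
        intro c hc
        have hrootc : Relation.ReflTransGen (relT tree) a c :=
          hroot.tail (stepB_iff.mpr ⟨cs, hx, hc⟩)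
        have h1 := IH k (by omega) (P ++ [x]) c (hchild c hc) hnd' hrootc hkeq m' (by omega)
        have h2 := IH k (by omega) (P ++ [x]) c (hchild c hc) hnd' hrootc hkeq k (le_refl _)
        omega
      show sizeW tree (m' + 1) x = sizeW tree (k + 1) x
      unfold sizeW
      rw [hx]
      show 1 + (cs.map (sizeW tree m')).sum = 1 + (cs.map (sizeW tree k)).sum
      rw [List.map_congr_left heach]

-- under Pre_, wF satisfies the exact BFS bookkeeping recurrence at every key
lemma wF_rec {a t : String} {tree : List (String × List String)}
    (hpre : Pre_find_descendant a t tree) {x : String} {cs : List String}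
    (hroot : Relation.ReflTransGen (relT tree) a x)
    (hx : (PySem.Dict.mk tree).get? x = some cs) :
    wF tree x = 1 + (cs.map (wF tree)).sum := by
  have h1 : wF tree x = 1 + (cs.map (sizeW tree tree.length)).sum := by
    unfold wF sizeW
    rw [hx]
  rw [h1]
  have hmap : cs.map (sizeW tree tree.length) = cs.map (wF tree) := by
    apply List.map_congr_left
    intro c hc
    have hch : List.IsChain (relT tree) ([x] ++ [c]) :=
      List.isChain_pair.mpr (stepB_iff.mpr ⟨cs, hx, hc⟩)
    exact (sizeW_stable hpre tree.length [x] c hch (by simp)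
      (hroot.tail (stepB_iff.mpr ⟨cs, hx, hc⟩)) (by simp)
      (tree.length + 1) (by omega)).symm
  rw [hmap]

-- unfolding of TransGen at a node
lemma tg_none {tree : List (String × List String)} {x t : String}
    (hx : (PySem.Dict.mk tree).get? x = none) :
    ¬ Relation.TransGen (relT tree) x t := by
  intro h
  rcases (Relation.TransGen.head'_iff).mp h with ⟨b, hb, _⟩
  rcases stepB_iff.mp hb with ⟨cs, hcs, _⟩
  rw [hx] at hcs; cases hcs

lemma tg_some {tree : List (String × List String)} {x t : String} {cs : List String}
    (hx : (PySem.Dict.mk tree).get? x = some cs) :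
    Relation.TransGen (relT tree) x t ↔ (t ∈ cs ∨ ∃ c ∈ cs, Relation.TransGen (relT tree) c t) := by
  constructor
  · intro h
    rcases (Relation.TransGen.head'_iff).mp h with ⟨b, hb, hbt⟩
    rcases stepB_iff.mp hb with ⟨cs', hcs', hbcs⟩
    rw [hx] at hcs'
    injection hcs' with e; subst e
    rcases (Relation.reflTransGen_iff_eq_or_transGen.mp hbt) with rfl | htg
    · exact Or.inl hbcs
    · exact Or.inr ⟨b, hbcs, htg⟩
  · rintro (h | ⟨c, hc, htg⟩)
    · exact Relation.TransGen.single (stepB_iff.mpr ⟨cs, hx, h⟩)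
    · exact Relation.TransGen.head (stepB_iff.mpr ⟨cs, hx, hc⟩) htg

-- main BFS lemma: with fuel ≥ phi q, bfsA answers exactly "some queue element reaches t"
lemma bfsA_iff {a t : String} {tree : List (String × List String)}
    (hpre : Pre_find_descendant a t tree) :
    ∀ (f : Nat) (q : List String), phi tree q ≤ f →
      (∀ y ∈ q, Relation.ReflTransGen (relT tree) a y) →
      (bfsA tree t f q = true ↔ ∃ x ∈ q, Relation.TransGen (relT tree) x t) := by
  intro f
  induction f with
  | zero =>
    intro q hq _
    cases q with
    | nil => simp [bfsA]
    | cons x rest =>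
      exfalso
      have := sizeW_pos tree (tree.length + 1) x
      simp [phi, wF] at hq
      omega
  | succ f ih =>
    intro q hq hq'
    cases q with
    | nil => simp [bfsA]
    | cons x rest =>
      have hwx : 1 ≤ wF tree x := sizeW_pos tree (tree.length + 1) x
      have hphi : phi tree (x :: rest) = wF tree x + phi tree rest := by simp [phi]
      cases hx : (PySem.Dict.mk tree).get? x with
      | none =>
        have h1 : bfsA tree t (f+1) (x :: rest) = bfsA tree t f rest := by
          rw [bfsA_succ_cons, hx]
        rw [h1, ih rest (by omega) (fun y hy => hq' y (List.mem_cons_of_mem _ hy))]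
        constructor
        · rintro ⟨y, hy, hty⟩; exact ⟨y, List.mem_cons_of_mem _ hy, hty⟩
        · rintro ⟨y, hy, hty⟩
          rcases List.mem_cons.mp hy with rfl | hy
          · exact absurd hty (tg_none hx)
          · exact ⟨y, hy, hty⟩
      | some cs =>
        by_cases ht : t ∈ cs
        · have h1 : bfsA tree t (f+1) (x :: rest) = true := by
            rw [bfsA_succ_cons, hx]
            show (match findScanA t cs rest with
                  | none => true
                  | some q' => bfsA tree t f q') = true
            rw [(scan_none_iff t cs rest).mpr ht]
          rw [h1]
          simp only [true_iff]
          exact ⟨x, List.mem_cons_self .., (tg_some hx).mpr (Or.inl ht)⟩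
        · have h1 : bfsA tree t (f+1) (x :: rest) = bfsA tree t f (rest ++ cs) := by
            rw [bfsA_succ_cons, hx]
            show (match findScanA t cs rest with
                  | none => true
                  | some q' => bfsA tree t f q') = bfsA tree t f (rest ++ cs)
            rw [scan_some t cs rest ht]
          have hq2 : ∀ y ∈ rest ++ cs, Relation.ReflTransGen (relT tree) a y := by
            intro y hy
            rcases List.mem_append.mp hy with hy | hy
            · exact hq' y (List.mem_cons_of_mem _ hy)
            · exact (hq' x (List.mem_cons_self ..)).tail (stepB_iff.mpr ⟨cs, hx, hy⟩)
          have hphi2 : phi tree (rest ++ cs) ≤ f := by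
            have hrec := wF_rec hpre (hq' x (List.mem_cons_self ..)) hx
            have he : phi tree (rest ++ cs) = phi tree rest + (cs.map (wF tree)).sum := by
              simp [phi]
            omega
          rw [h1, ih (rest ++ cs) hphi2 hq2]
          constructor
          · rintro ⟨y, hy, hty⟩
            rcases List.mem_append.mp hy with hy | hy
            · exact ⟨y, List.mem_cons_of_mem _ hy, hty⟩
            · exact ⟨x, List.mem_cons_self .., (tg_some hx).mpr (Or.inr ⟨y, hy, hty⟩)⟩
          · rintro ⟨y, hy, hty⟩
            rcases List.mem_cons.mp hy with rfl | hy
            · rcases (tg_some hx).mp hty with h | ⟨c, hc, htc⟩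
              · exact absurd h ht
              · exact ⟨c, List.mem_append_right _ hc, htc⟩
            · exact ⟨y, List.mem_append_left _ hy, hty⟩

-- soundness of B's DFS: a true answer exhibits a path
lemma reachB_sound (tree : List (String × List String)) (t : String) :
    ∀ (f : Nat) (x : String), reachB tree t f x = true → Relation.TransGen (relT tree) x t := by
  intro f
  induction f with
  | zero => intro x h; simp [reachB] at h
  | succ f ih =>
    intro x h
    rw [reachB_succ] at h
    cases hx : (PySem.Dict.mk tree).get? x with
    | none => rw [hx] at h; simp at h
    | some cs =>
      rw [hx] at h
      have h' : cs.any (fun c => c == t || reachB tree t f c) = true := h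
      rcases List.any_eq_true.mp h' with ⟨c, hc, hcond⟩
      rcases Bool.or_eq_true .. |>.mp hcond with heq | hrec
      · have hct : c = t := by simpa using heq
        subst hct
        exact Relation.TransGen.single (stepB_iff.mpr ⟨cs, hx, hc⟩)
      · exact Relation.TransGen.head (stepB_iff.mpr ⟨cs, hx, hc⟩) (ih c hrec)

-- running B's DFS along a short chain
lemma reachB_run {tree : List (String × List String)} {t : String} :
    ∀ (l : List String) (x : String) (f : Nat),
      List.IsChain (relT tree) (x :: l ++ [t]) → l.length < f →
      reachB tree t f x = true := by
  intro l
  induction l with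
  | nil =>
    intro x f hch hf
    have hxt : relT tree x t := List.isChain_pair.mp hch
    rcases stepB_iff.mp hxt with ⟨cs, hcs, hmem⟩
    obtain ⟨f', rfl⟩ : ∃ f', f = f' + 1 := ⟨f - 1, by omega⟩
    rw [reachB_succ, hcs]
    show cs.any (fun c => c == t || reachB tree t f' c) = true
    simp only [List.any_eq_true, Bool.or_eq_true]
    exact ⟨t, hmem, Or.inl (by simp)⟩
  | cons c l ih =>
    intro x f hch hf
    have hxc : relT tree x c := (List.isChain_cons_cons.mp hch).1
    have hrest : List.IsChain (relT tree) (c :: l ++ [t]) := (List.isChain_cons_cons.mp hch).2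
    rcases stepB_iff.mp hxc with ⟨cs, hcs, hmem⟩
    obtain ⟨f', rfl⟩ : ∃ f', f = f' + 1 := ⟨f - 1, by omega⟩
    rw [reachB_succ, hcs]
    show cs.any (fun c' => c' == t || reachB tree t f' c') = true
    simp only [List.any_eq_true, Bool.or_eq_true]
    exact ⟨c, hmem, Or.inr (ih c f' hrest (by simp at hf; omega))⟩

-- completeness of B's DFS with fuel tree.length + 1
lemma reachB_complete {tree : List (String × List String)} {t x : String}
    (h : Relation.TransGen (relT tree) x t) :
    reachB tree t (tree.length + 1) x = true := by
  rcases (Relation.TransGen.head'_iff).mp h with ⟨c, hxc, hct⟩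
  rcases List.exists_isChain_cons_of_relationReflTransGen hct with ⟨l, hchain, hlast⟩
  have hne : (c :: l) ≠ [] := by simp
  have hsplit : c :: l = (c :: l).dropLast ++ [t] := by
    conv_lhs => rw [← List.dropLast_append_getLast hne]
    rw [show (c :: l).getLast hne = t from hlast]
  have hch : List.IsChain (relT tree) (x :: (c :: l).dropLast ++ [t]) := by
    have h2 : List.IsChain (relT tree) (x :: (c :: l)) :=
      List.isChain_cons_cons.mpr ⟨hxc, hchain⟩
    rw [hsplit] at h2
    simpa using h2
  rcases dedup_chain (tree := tree) ((c :: l).dropLast.length) (c :: l).dropLast x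
      (le_refl _) hch with ⟨l', hnd, hch'⟩
  have hkeys : ∀ v ∈ x :: l', ((PySem.Dict.mk tree).get? v).isSome := by
    have hk := keys_of_chain tree (x :: l') t (by simpa using hch')
    exact hk
  have hlen : (x :: l').length ≤ tree.length := len_bound tree _ hnd hkeys
  apply reachB_run l' x (tree.length + 1) hch'
  simp at hlen
  omega


-- ===== VERDICT (by name: the statement is the Claim_ definition above) =====
theorem find_descendant_spec : Claim_equal_find_descendant := by
  unfold Claim_equal_find_descendant
  intro a t tree _ hpre
  unfold Spec_find_descendant find_descendant find_descendant_alt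
  have hA := bfsA_iff hpre (sizeW tree (tree.length + 1) a) [a] (by simp [phi, wF])
    (by intro y hy; simp at hy; subst hy; exact Relation.ReflTransGen.refl)
  have hiffA : bfsA tree t (sizeW tree (tree.length + 1) a) [a] = true ↔
      Relation.TransGen (relT tree) a t := by
    rw [hA]; simp
  have hiffB : reachB tree t (tree.length + 1) a = true ↔
      Relation.TransGen (relT tree) a t :=
    ⟨reachB_sound tree t _ a, reachB_complete⟩
  by_cases h : Relation.TransGen (relT tree) a t
  · rw [hiffA.mpr h, hiffB.mpr h]
  · have e1 : bfsA tree t (sizeW tree (tree.length + 1) a) [a] = false :=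
      Bool.eq_false_iff.mpr (fun e => h (hiffA.mp e))
    have e2 : reachB tree t (tree.length + 1) a = false :=
      Bool.eq_false_iff.mpr (fun e => h (hiffB.mp e))
    rw [e1, e2]
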